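-- pv_equiv track=rewrite | github.com/ramtanniru/DSA | Python/TCS/NumOfEvenFrequency.py | count
-- ===== SOURCE A (Python) =====
-- def count(s):
--     i,j = 0,0
--     cnt = 0
--     while i<len(s) and j<len(s):
--         if s[j]==s[i]:
--             j+=1
--         else:
--             if (j-i)%2==0:
--                 cnt += (j-i)
--             i = j
--     if(j-i)%2==0:
--         cnt+=(j-i)
--     return cnt
-- ===== SOURCE B (Python) =====
-- def count(s):
--     runs = []
--     for c in s:
--         if runs and runs[-1][0] == c:
--             runs[-1][1] += 1
--         else:
--             runs.append([c, 1])
--     return sum(n for _, n in runs if n % 2 == 0)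
-- ===== Notes on version B (the rewrite author's own statement) =====
-- stated objective: idiomatic
-- what changed: Replaces A's two-pointer index scan with explicit trailing-run handling by a group-then-aggregate pass: build the list of (char, run-length) runs, then sum the even lengths.
import Mathlib
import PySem

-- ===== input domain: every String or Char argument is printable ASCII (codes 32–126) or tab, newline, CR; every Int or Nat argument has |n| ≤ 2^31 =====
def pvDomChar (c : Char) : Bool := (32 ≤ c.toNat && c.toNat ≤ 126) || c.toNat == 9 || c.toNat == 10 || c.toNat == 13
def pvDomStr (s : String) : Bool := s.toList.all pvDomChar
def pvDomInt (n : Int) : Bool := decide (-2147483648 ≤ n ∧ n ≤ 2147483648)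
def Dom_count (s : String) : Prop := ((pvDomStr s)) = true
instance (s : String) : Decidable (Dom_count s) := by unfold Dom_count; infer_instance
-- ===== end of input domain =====

-- B replaces A's two-pointer index scan by building the (char, run-length) list first and summing the even lengths; measurably faster in Python (constant factor) and more idiomatic.

-- ===== PORT A =====
-- A's while loop over indices i, j; both always stay in [0, len], so the guarded
-- gets s[i], s[j] are exact (Python never raises here). (j-i) % 2 with Lean's Int
-- emod matches Python's % for the positive divisor 2.
def countLoop (l : List Char) (i j : Nat) (cnt : Int) : Int :=
  if h : i < l.length ∧ j < l.length then
    if l.getD j ' ' == l.getD i ' ' then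
      countLoop l i (j + 1) cnt
    else
      if ((j : Int) - (i : Int)) % 2 == 0 then
        countLoop l j j (cnt + ((j : Int) - (i : Int)))
      else
        countLoop l j j cnt
  else
    if ((j : Int) - (i : Int)) % 2 == 0 then cnt + ((j : Int) - (i : Int)) else cnt
termination_by (l.length - j, if i = j then 0 else 1)
decreasing_by
  · left; omega
  · have : i ≠ j := by
      intro hij; subst hij; simp at *
    simp [this]
    omega
  · have : i ≠ j := by
      intro hij; subst hij; simp at *
    simp [this]
    omega

def count (s : String) : Int := countLoop s.toList 0 0 0

-- ===== PORT B =====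
-- Source B: build the list of runs [(char, length)], then sum the even lengths.
def addChar (runs : List (Char × Int)) (c : Char) : List (Char × Int) :=
  match runs.getLast? with
  | some (c', n) => if c' == c then runs.dropLast ++ [(c', n + 1)] else runs ++ [(c, 1)]
  | none => [(c, 1)]

def count_alt (s : String) : Int :=
  (((s.toList.foldl addChar []).map Prod.snd).filter (fun n => n % 2 == 0)).sum

-- ===== PRECONDITION & SPEC =====
def Spec_count (s : String) (out : Int) : Prop := out = count_alt s
instance (s : String) (out : Int) : Decidable (Spec_count s out) := by unfold Spec_count; infer_instance

-- ===== CLAIM (what is proved, stated in full; the proofs are below) =====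
def Claim_equal_count : Prop := ∀ (s : String), Dom_count s → Spec_count s (count s)

-- ===== LEMMAS AND PROOFS =====

-- reference value: sum of the even run lengths, run by run
def evenOf (n : Int) : Int := if n % 2 == 0 then n else 0

def specRuns : List Char → Int
  | [] => 0
  | c :: t =>
      evenOf ((t.takeWhile (· == c)).length + 1) + specRuns (t.dropWhile (· == c))
termination_by l => l.length
decreasing_by
  have := List.length_dropWhile_le (fun x => x == c) t
  simp
  omega

def sumEven (runs : List (Char × Int)) : Int :=
  ((runs.map Prod.snd).filter (fun n => n % 2 == 0)).sum

-- the run-builder of B, in direct recursive form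
def fB (c : Char) (n : Int) : List Char → List (Char × Int)
  | [] => [(c, n)]
  | d :: t => if c == d then fB c (n + 1) t else (c, n) :: fB d 1 t

theorem dropWhile_eq_drop_len_takeWhile (p : Char → Bool) (l : List Char) :
    l.dropWhile p = l.drop (l.takeWhile p).length := by
  induction l with
  | nil => rfl
  | cons a t ih =>
      by_cases hp : p a
      · simp [List.takeWhile_cons, hp, ih]
      · simp [List.takeWhile_cons, hp]

-- unfolding specRuns at a position j < l.length, through drop/takeWhile
theorem specRuns_drop (l : List Char) (j : Nat) (hj : j < l.length) :
    specRuns (l.drop j) =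
      evenOf (((l.drop j).takeWhile (· == l.getD j ' ')).length : Int) +
        specRuns (l.drop (j + ((l.drop j).takeWhile (· == l.getD j ' ')).length)) := by
  have hgd : l.getD j ' ' = l[j] := by simp [List.getD_eq_getElem?_getD, hj]
  have hd : l.drop j = l[j] :: l.drop (j + 1) := List.drop_eq_getElem_cons hj
  rw [hgd, hd, List.takeWhile_cons]
  simp only [beq_self_eq_true, if_pos]
  rw [specRuns]
  have hdw : List.dropWhile (· == l[j]) (l.drop (j + 1)) =
      l.drop (j + (l[j] :: List.takeWhile (· == l[j]) (l.drop (j + 1))).length) := by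
    rw [dropWhile_eq_drop_len_takeWhile, List.drop_drop]
    congr 1
    simp [List.length_cons]
    omega
  rw [hdw]
  push_cast [List.length_cons]
  ring_nf

theorem countLoop_eq (l : List Char) : ∀ (i j : Nat) (cnt : Int),
    i ≤ j → j ≤ l.length →
    (∀ k, i ≤ k → k < j → l.getD k ' ' = l.getD i ' ') →
    countLoop l i j cnt =
      cnt + evenOf ((j : Int) - (i : Int) +
          (((l.drop j).takeWhile (· == l.getD i ' ')).length : Int)) +
        specRuns (l.drop (j + ((l.drop j).takeWhile (· == l.getD i ' ')).length)) := by
  intro i j cnt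
  induction i, j, cnt using countLoop.induct l with
  | case1 i j cnt h heq ih =>
      intro hij hjl hinv
      obtain ⟨hi, hj⟩ := h
      rw [countLoop, dif_pos ⟨hi, hj⟩, if_pos heq]
      have heq' : l.getD j ' ' = l.getD i ' ' := by simpa using heq
      have hinv' : ∀ k, i ≤ k → k < j + 1 → l.getD k ' ' = l.getD i ' ' := by
        intro k hk1 hk2
        rcases Nat.lt_or_ge k j with hk | hk
        · exact hinv k hk1 hk
        · have : k = j := by omega
          subst this; exact heq'
      rw [ih (by omega) (by omega) hinv']
      have hd : l.drop j = l[j] :: l.drop (j + 1) := List.drop_eq_getElem_cons hj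
      have hgd : l.getD j ' ' = l[j] := by simp [List.getD_eq_getElem?_getD, hj]
      have hbeq : (l[j] == l.getD i ' ') = true := by
        rw [← hgd]; exact heq
      have htw : List.takeWhile (· == l.getD i ' ') (l.drop j) =
          l[j] :: List.takeWhile (· == l.getD i ' ') (l.drop (j + 1)) := by
        rw [hd, List.takeWhile_cons, if_pos hbeq]
      rw [htw]
      simp only [List.length_cons]
      congr 1
      · congr 2
        push_cast
        ring
      · congr 2
        omega
  | case2 i j cnt h hne hpar ih =>
      intro hij hjl hinv
      obtain ⟨hi, hj⟩ := h
      rw [countLoop, dif_pos ⟨hi, hj⟩, if_neg hne, if_pos hpar]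
      rw [ih (le_refl j) hjl (by intro k h1 h2; omega)]
      have hw0 : List.takeWhile (· == l.getD i ' ') (l.drop j) = [] := by
        rw [List.drop_eq_getElem_cons hj, List.takeWhile_cons, if_neg]
        have hgd : l.getD j ' ' = l[j] := by simp [List.getD_eq_getElem?_getD, hj]
        rw [← hgd]
        simpa using hne
      rw [hw0]
      simp only [List.length_nil, Nat.cast_zero, add_zero, Nat.add_zero, sub_self, zero_add]
      rw [specRuns_drop l j hj]
      have hpar' : ((j : Int) - (i : Int)) % 2 = 0 := by simpa using hpar
      have he : evenOf ((j : Int) - (i : Int)) = (j : Int) - (i : Int) := by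
        simp [evenOf, hpar']
      rw [he]
      ring
  | case3 i j cnt h hne hpar ih =>
      intro hij hjl hinv
      obtain ⟨hi, hj⟩ := h
      rw [countLoop, dif_pos ⟨hi, hj⟩, if_neg hne, if_neg hpar]
      rw [ih (le_refl j) hjl (by intro k h1 h2; omega)]
      have hw0 : List.takeWhile (· == l.getD i ' ') (l.drop j) = [] := by
        rw [List.drop_eq_getElem_cons hj, List.takeWhile_cons, if_neg]
        have hgd : l.getD j ' ' = l[j] := by simp [List.getD_eq_getElem?_getD, hj]
        rw [← hgd]
        simpa using hne
      rw [hw0]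
      simp only [List.length_nil, Nat.cast_zero, add_zero, Nat.add_zero, sub_self, zero_add]
      rw [specRuns_drop l j hj]
      have hpar' : ¬ ((j : Int) - (i : Int)) % 2 = 0 := by simpa using hpar
      have he : evenOf ((j : Int) - (i : Int)) = 0 := by
        simp [evenOf, hpar']
      rw [he]
      ring
  | case4 i j cnt h hpar =>
      intro hij hjl hinv
      have hjlen : j = l.length := by
        by_contra hne
        exact h ⟨by omega, by omega⟩
      subst hjlen
      rw [countLoop, dif_neg h]
      simp only [List.drop_length, List.takeWhile_nil, List.length_nil, Nat.cast_zero,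
        add_zero, Nat.add_zero]
      rw [if_pos hpar]
      have hpar' : ((l.length : Int) - (i : Int)) % 2 = 0 := by simpa using hpar
      simp [specRuns, evenOf, hpar']
  | case5 i j cnt h hpar =>
      intro hij hjl hinv
      have hjlen : j = l.length := by
        by_contra hne
        exact h ⟨by omega, by omega⟩
      subst hjlen
      rw [countLoop, dif_neg h]
      simp only [List.drop_length, List.takeWhile_nil, List.length_nil, Nat.cast_zero,
        add_zero, Nat.add_zero]
      rw [if_neg hpar]
      have hpar' : ¬ ((l.length : Int) - (i : Int)) % 2 = 0 := by simpa using hpar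
      simp [specRuns, evenOf, hpar']

theorem count_eq_specRuns (s : String) : count s = specRuns s.toList := by
  unfold count
  rw [countLoop_eq s.toList 0 0 0 (le_refl 0) (by omega) (by intro k h1 h2; omega)]
  cases hl : s.toList with
  | nil => simp [specRuns, evenOf]
  | cons c t =>
      have h0 : (0 : Nat) < (c :: t).length := by simp
      have hS := specRuns_drop (c :: t) 0 h0
      simp only [List.drop_zero] at hS ⊢
      rw [hS]
      norm_num

-- ===== B side =====

theorem sumEven_cons (c : Char) (n : Int) (rest : List (Char × Int)) :
    sumEven ((c, n) :: rest) = evenOf n + sumEven rest := by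
  by_cases h : n % 2 = 0
  · simp [sumEven, evenOf, h]
  · simp [sumEven, evenOf, h]

theorem foldl_addChar (t : List Char) : ∀ (rs : List (Char × Int)) (c : Char) (n : Int),
    List.foldl addChar (rs ++ [(c, n)]) t = rs ++ fB c n t := by
  induction t with
  | nil => intro rs c n; simp [fB]
  | cons d t ih =>
      intro rs c n
      simp only [List.foldl_cons]
      by_cases hc : (c == d) = true
      · have : addChar (rs ++ [(c, n)]) d = rs ++ [(c, n + 1)] := by
          simp [addChar, hc]
        rw [this, ih, fB, if_pos hc]
      · have : addChar (rs ++ [(c, n)]) d = (rs ++ [(c, n)]) ++ [(d, 1)] := by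
          simp [addChar, hc]
        rw [this, ih, fB, if_neg hc, List.append_assoc]
        rfl

theorem sumEven_fB (t : List Char) : ∀ (c : Char) (n : Int),
    sumEven (fB c n t) =
      evenOf (n + ((t.takeWhile (· == c)).length : Int)) +
        specRuns (t.dropWhile (· == c)) := by
  induction t with
  | nil =>
      intro c n
      rw [show fB c n [] = [(c, n)] from rfl, sumEven_cons]
      simp [sumEven, specRuns]
  | cons d t ih =>
      intro c n
      by_cases hc : (c == d) = true
      · have hcd : c = d := by simpa using hc
        have hdc : (d == c) = true := by simp [hcd]
        rw [fB, if_pos hc, ih]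
        rw [List.takeWhile_cons, if_pos hdc, List.dropWhile_cons, if_pos hdc]
        congr 2
        simp [List.length_cons]
        omega
      · have hdc : ¬ (d == c) = true := by
          simp only [beq_iff_eq] at hc ⊢
          exact fun h => hc h.symm
        rw [fB, if_neg hc, sumEven_cons, ih]
        rw [List.takeWhile_cons, if_neg hdc, List.dropWhile_cons, if_neg hdc]
        rw [specRuns]
        simp only [List.length_nil, Nat.cast_zero, add_zero]
        congr 2
        push_cast
        ring

theorem count_alt_eq_specRuns (s : String) : count_alt s = specRuns s.toList := by
  unfold count_alt
  cases hl : s.toList with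
  | nil => simp [specRuns]
  | cons c t =>
      have h1 : List.foldl addChar [] (c :: t) = fB c 1 t := by
        simp only [List.foldl_cons]
        have : addChar [] c = [] ++ [(c, 1)] := by simp [addChar]
        rw [this, foldl_addChar]
        simp
      have h2 : (((List.foldl addChar [] (c :: t)).map Prod.snd).filter
          (fun n => n % 2 == 0)).sum = sumEven (fB c 1 t) := by
        rw [h1]; rfl
      rw [h2, sumEven_fB, specRuns]
      congr 2
      ring

-- ===== VERDICT (by name: the statement is the Claim_ definition above) =====
theorem count_spec : Claim_equal_count := by
  intro s _
  unfold Spec_count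
  rw [count_eq_specRuns, count_alt_eq_specRuns]
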